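-- pv_equiv track=rewrite | github.com/machine-learning-art/code-samples | samples_nlp_lsa_analysis/nlp_lsa_preprocessing_code.py | removeBracketed
-- ===== SOURCE A (Python) =====
-- def removeBracketed(text):
--     '''Remove text enclosed in square brackets.  Regexes can't really handle
--     nested brackets, so this does it manually.'''
--     bc = 0
--     temp = ''
--     for char in text:
--         if char == '[':
--             bc += 1
--         if bc == 0: temp += char
--         if char == ']':
--             bc -= 1
--     return temp
-- ===== SOURCE B (Python) =====
-- def removeBracketed(text):
--     # Two-pass: prefix bracket-depth table, then index/char filter (no intertwined branches).
--     depths = [0]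
--     for c in text:
--         depths.append(depths[-1] + (1 if c == '[' else -1 if c == ']' else 0))
--     return ''.join(c for i, c in enumerate(text) if depths[i] + (c == '[') == 0)
-- ===== Notes on version B (the rewrite author's own statement) =====
-- stated objective: alternative
-- what changed: Replaces the single loop with intertwined increment/emit/decrement branches by a prefix bracket-depth table built in one pass plus a separate pass filtering character i by depths[i] + (c=='[') == 0.
import Mathlib
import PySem

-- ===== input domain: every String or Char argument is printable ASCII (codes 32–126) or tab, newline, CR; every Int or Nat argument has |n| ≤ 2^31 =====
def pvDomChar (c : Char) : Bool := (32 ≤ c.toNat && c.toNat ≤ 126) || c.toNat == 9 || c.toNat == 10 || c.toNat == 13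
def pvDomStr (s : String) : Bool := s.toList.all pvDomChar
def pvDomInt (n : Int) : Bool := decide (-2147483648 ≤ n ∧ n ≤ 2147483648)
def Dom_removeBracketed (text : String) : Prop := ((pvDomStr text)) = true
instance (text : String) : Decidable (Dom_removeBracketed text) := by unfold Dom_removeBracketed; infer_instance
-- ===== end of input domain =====

-- B replaces A's single intertwined-branch loop by a prefix-depth table pass plus a filtering pass (objective: alternative decomposition; same cost).

-- ===== PORT A =====
-- A's for-loop over the characters, carrying (bc, temp) exactly as the Python does.
def removeBracketedLoop : List Char → Int → List Char → List Char
  | [], _, temp => temp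
  | c :: cs, bc, temp =>
    let bc1 := if c = '[' then bc + 1 else bc
    let temp1 := if bc1 = 0 then temp ++ [c] else temp
    let bc2 := if c = ']' then bc1 - 1 else bc1
    removeBracketedLoop cs bc2 temp1

def removeBracketed (text : String) : String :=
  String.mk (removeBracketedLoop text.toList 0 [])

-- ===== PORT B =====
-- depths.append(depths[-1] + delta) loop: the tail of the prefix-depth table, given the running depth.
def rbDelta (c : Char) : Int := if c = '[' then 1 else if c = ']' then -1 else 0

def rbDepthsTail : List Char → Int → List Int
  | [], _ => []
  | c :: cs, d => (d + rbDelta c) :: rbDepthsTail cs (d + rbDelta c)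

-- the filtering comprehension: keep c_i iff depths[i] + (c_i == '[') == 0
def rbFilter : List Char → List Int → List Char
  | c :: cs, d :: ds =>
    if d + (if c = '[' then 1 else 0) = 0 then c :: rbFilter cs ds else rbFilter cs ds
  | _, _ => []

def removeBracketed_alt (text : String) : String :=
  String.mk (rbFilter text.toList (0 :: rbDepthsTail text.toList 0))

-- ===== PRECONDITION & SPEC =====
def Spec_removeBracketed (text : String) (out : String) : Prop := out = removeBracketed_alt text
instance (text : String) (out : String) : Decidable (Spec_removeBracketed text out) := by unfold Spec_removeBracketed; infer_instance

-- ===== CLAIM (what is proved, stated in full; the proofs are below) =====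
def Claim_equal_removeBracketed : Prop := ∀ (text : String), Dom_removeBracketed text → Spec_removeBracketed text (removeBracketed text)

-- ===== LEMMAS AND PROOFS =====
theorem rbLoop_eq_filter (cs : List Char) :
    ∀ (bc : Int) (temp : List Char),
      removeBracketedLoop cs bc temp = temp ++ rbFilter cs (bc :: rbDepthsTail cs bc) := by
  induction cs with
  | nil => intro bc temp; simp [removeBracketedLoop, rbFilter]
  | cons c cs ih =>
    intro bc temp
    simp only [removeBracketedLoop, rbDepthsTail, rbFilter]
    by_cases h : c = '['
    · simp only [h, rbDelta]
      by_cases hz : bc + 1 = 0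
      · simp [hz, ih, show ('[' : Char) ≠ ']' by decide]
      · simp [hz, ih, show ('[' : Char) ≠ ']' by decide]
    · by_cases h2 : c = ']'
      · simp only [h2, rbDelta, show (']' : Char) ≠ '[' by decide, if_false]
        by_cases hz : bc = 0
        · simp [hz, ih]
        · have e : bc + -1 = bc - 1 := by ring
          simp [hz, ih, e]
      · simp only [if_neg h, if_neg h2, rbDelta]
        by_cases hz : bc = 0
        · simp [hz, ih]
        · simp [hz, ih]

-- ===== VERDICT (by name: the statement is the Claim_ definition above) =====
theorem removeBracketed_spec : Claim_equal_removeBracketed := by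
  intro text _
  unfold Spec_removeBracketed removeBracketed removeBracketed_alt
  rw [rbLoop_eq_filter]
  simp
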